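-- pv_equiv track=rewrite | github.com/chenweigao/_code | interview/wangyi3_01_string.py | max_length_of_substring
-- ===== SOURCE A (Python) =====
-- def max_length_of_substring(s) -> int:
--     n = len(s)
--     res, temp = 1, 1
--     if n == 0:
--         return 0
--     if n == 1:
--         return 1
--     for i in range(n - 1):
--         if s[i] != s[i + 1]:
--             temp += 1
--         else:
--             temp = 1
--         res = max(res, temp)
--     return res
-- ===== SOURCE B (Python) =====
-- def max_length_of_substring(s) -> int:
--     n = len(s)
--     if n == 0:
--         return 0
--     breaks = [-1] + [i for i in range(n - 1) if s[i] == s[i + 1]] + [n - 1]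
--     best = 0
--     for j in range(len(breaks) - 1):
--         best = max(best, breaks[j + 1] - breaks[j])
--     return best
-- ===== Notes on version B (the rewrite author's own statement) =====
-- stated objective: alternative
-- what changed: Replaces the running res/temp accumulator scan with a two-phase computation: collect the break indices where adjacent characters are equal (with -1 and n-1 sentinels) and take the maximum difference of consecutive break indices.
import Mathlib
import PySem

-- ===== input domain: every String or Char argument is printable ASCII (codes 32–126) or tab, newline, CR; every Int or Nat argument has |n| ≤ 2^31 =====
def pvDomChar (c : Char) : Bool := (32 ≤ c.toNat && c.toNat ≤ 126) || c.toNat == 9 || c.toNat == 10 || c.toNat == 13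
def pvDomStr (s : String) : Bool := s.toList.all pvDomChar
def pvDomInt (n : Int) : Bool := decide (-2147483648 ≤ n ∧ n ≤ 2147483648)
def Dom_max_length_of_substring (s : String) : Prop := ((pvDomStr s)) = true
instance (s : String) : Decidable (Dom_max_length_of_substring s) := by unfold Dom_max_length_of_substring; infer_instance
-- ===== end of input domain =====

-- B replaces A's running res/temp accumulator with a two-phase break-index computation (alternative decomposition, same O(n) cost).

-- ===== PORT A =====
def max_length_of_substring (s : String) : Int :=
  let l := s.toList
  let n : Int := l.length
  if n = 0 then 0
  else if n = 1 then 1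
  else
    let st := (PySem.List.pyRange 0 (n - 1) 1).foldl
      (fun (st : Int × Int) (i : Int) =>
        let temp := if PySem.List.pyGet? l i ≠ PySem.List.pyGet? l (i + 1) then st.2 + 1 else 1
        (max st.1 temp, temp)) (1, 1)
    st.1

-- ===== PORT B =====
def max_length_of_substring_alt (s : String) : Int :=
  let l := s.toList
  let n : Int := l.length
  if n = 0 then 0
  else
    let breaks : List Int :=
      [-1] ++ (PySem.List.pyRange 0 (n - 1) 1).filter
        (fun i => PySem.List.pyGet? l i == PySem.List.pyGet? l (i + 1)) ++ [n - 1]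
    (PySem.List.pyRange 0 ((breaks.length : Int) - 1) 1).foldl
      (fun best j => max best (PySem.List.pyGetD breaks (j + 1) 0 - PySem.List.pyGetD breaks j 0)) 0

-- ===== PRECONDITION & SPEC =====
def Spec_max_length_of_substring (s : String) (out : Int) : Prop := out = max_length_of_substring_alt s
instance (s : String) (out : Int) : Decidable (Spec_max_length_of_substring s out) := by unfold Spec_max_length_of_substring; infer_instance

-- ===== CLAIM (what is proved, stated in full; the proofs are below) =====
def Claim_equal_max_length_of_substring : Prop := ∀ (s : String), Dom_max_length_of_substring s → Spec_max_length_of_substring s (max_length_of_substring s)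

-- ===== LEMMAS AND PROOFS =====

-- the Bool "s[k] == s[k+1]" at index k (A's branch test, B's filter test)
def pvQ (l : List Char) (k : Nat) : Bool :=
  PySem.List.pyGet? l (k : Int) == PySem.List.pyGet? l ((k : Int) + 1)

-- the adjacent-equality bit list of l
def pvE (l : List Char) : List Bool := (List.range (l.length - 1)).map (pvQ l)

-- A's loop step on one bit
def pvStepA (st : Int × Int) (b : Bool) : Int × Int :=
  let temp := if b then 1 else st.2 + 1
  (max st.1 temp, temp)

-- positions (as Ints, offset k) of the true bits
def pvPos (k : Nat) : List Bool → List Int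
  | [] => []
  | b :: t => (if b then [(k : Int)] else []) ++ pvPos (k + 1) t

-- running (prev, best-gap) over a list of break points
def pvGmP (prev acc : Int) : List Int → Int × Int
  | [] => (prev, acc)
  | x :: t => pvGmP x (max acc (x - prev)) t

theorem pvPos_append (u v : List Bool) (k : Nat) :
    pvPos k (u ++ v) = pvPos k u ++ pvPos (k + u.length) v := by
  induction u generalizing k with
  | nil => simp [pvPos]
  | cons b t ih => simp [pvPos, ih, Nat.add_comm, Nat.add_left_comm]

theorem pvGmP_append_singleton (t : List Int) (prev acc x : Int) :
    pvGmP prev acc (t ++ [x]) =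
      ((x, max (pvGmP prev acc t).2 (x - (pvGmP prev acc t).1)) : Int × Int) := by
  induction t generalizing prev acc with
  | nil => simp [pvGmP]
  | cons y t ih => simp [pvGmP, ih]

-- B's index loop over consecutive pairs, as a fold over the zip
theorem pvZipFold (t : List Int) (x acc : Int) :
    ((x :: t).zip t).foldl (fun b pr => max b (pr.2 - pr.1)) acc = (pvGmP x acc t).2 := by
  induction t generalizing x acc with
  | nil => simp [pvGmP]
  | cons y t ih => simpa [pvGmP] using ih y (max acc (y - x))

-- the filtered range of B is exactly the true-positions of pvE
theorem pvFilter_eq_pos (l : List Char) (m : Nat) :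
    ((List.range m).map (fun (k : Nat) => (0 : Int) + (k : Int))).filter
        (fun i => PySem.List.pyGet? l i == PySem.List.pyGet? l (i + 1))
      = pvPos 0 ((List.range m).map (pvQ l)) := by
  induction m with
  | zero => rfl
  | succ m ih =>
      rw [List.range_succ, List.map_append (f := fun (k : Nat) => (0 : Int) + (k : Int)),
          List.filter_append, List.map_append (f := pvQ l),
          pvPos_append, ih, List.length_map, List.length_range]
      congr 1
      cases hq : pvQ l m <;>
      · have hq2 := hq
        unfold pvQ at hq2
        simp only [PySem.List.pyGet?_natCast] at hq2
        simp [pvPos, hq, hq2]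

-- the core invariant: A's accumulator state in terms of the break positions
theorem pvCore (e : List Bool) :
    e.foldl pvStepA (1, 1)
      = (max (pvGmP (-1) 0 (pvPos 0 e)).2 ((e.length : Int) - (pvGmP (-1) 0 (pvPos 0 e)).1),
         (e.length : Int) - (pvGmP (-1) 0 (pvPos 0 e)).1)
    ∧ (pvGmP (-1) 0 (pvPos 0 e)).1 ≤ (e.length : Int) - 1 := by
  induction e using List.reverseRecOn with
  | nil => simp [pvPos, pvGmP]
  | append_singleton e b ih =>
      obtain ⟨ih1, ih2⟩ := ih
      rw [List.foldl_append, ih1]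
      cases b with
      | false =>
          have hpos : pvPos 0 (e ++ [false]) = pvPos 0 e := by
            rw [pvPos_append]; simp [pvPos]
          rw [hpos]
          have hlen : (((e ++ [false]).length : Nat) : Int) = (e.length : Int) + 1 := by
            simp
          constructor
          · simp only [List.foldl_cons, List.foldl_nil, pvStepA, Bool.false_eq_true, if_false, hlen]
            have h2 : (e.length : Int) - (pvGmP (-1) 0 (pvPos 0 e)).1 + 1
                = (e.length : Int) + 1 - (pvGmP (-1) 0 (pvPos 0 e)).1 := by omega
            rw [h2, max_assoc,
              max_eq_right (show ((e.length : Int) - (pvGmP (-1) 0 (pvPos 0 e)).1 : Int)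
                ≤ (e.length : Int) + 1 - (pvGmP (-1) 0 (pvPos 0 e)).1 by omega)]
          · rw [hlen]; omega
      | true =>
          have hpos : pvPos 0 (e ++ [true]) = pvPos 0 e ++ [((e.length : Nat) : Int)] := by
            rw [pvPos_append]; simp [pvPos]
          rw [hpos, pvGmP_append_singleton]
          have hlen : (((e ++ [true]).length : Nat) : Int) = (e.length : Int) + 1 := by
            simp
          constructor
          · simp only [List.foldl_cons, List.foldl_nil, pvStepA, if_true, hlen]
            have h1 : (e.length : Int) + 1 - (e.length : Int) = 1 := by omega
            rw [h1]
          · rw [hlen]; omega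

-- A's pyRange fold equals the structural fold over pvE
theorem pvBridgeA (l : List Char) (h : 1 ≤ l.length) :
    (PySem.List.pyRange 0 ((l.length : Int) - 1) 1).foldl
      (fun (st : Int × Int) (i : Int) =>
        (max st.1 (if PySem.List.pyGet? l i ≠ PySem.List.pyGet? l (i + 1) then st.2 + 1 else 1),
         if PySem.List.pyGet? l i ≠ PySem.List.pyGet? l (i + 1) then st.2 + 1 else 1)) (1, 1)
    = (pvE l).foldl pvStepA (1, 1) := by
  rw [PySem.List.pyRange_one]
  have hm : (((l.length : Int) - 1) - 0).toNat = l.length - 1 := by omega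
  rw [hm, List.foldl_map]
  unfold pvE
  rw [List.foldl_map]
  apply PySem.List.foldl_congr_mem
  intro acc k _
  simp [pvStepA, pvQ]

theorem pvMain (s : String) :
    max_length_of_substring s = max_length_of_substring_alt s := by
  unfold max_length_of_substring max_length_of_substring_alt
  set l := s.toList with hl
  by_cases h0 : (l.length : Int) = 0
  · simp [h0]
  · have hlen : 1 ≤ l.length := by omega
    simp only [if_neg h0]
    -- rewrite B's breaks into cons/append normal form over pvPos
    have hfilter : (PySem.List.pyRange 0 ((l.length : Int) - 1) 1).filter
        (fun i => PySem.List.pyGet? l i == PySem.List.pyGet? l (i + 1))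
        = pvPos 0 (pvE l) := by
      rw [PySem.List.pyRange_one]
      have hm : (((l.length : Int) - 1) - 0).toNat = l.length - 1 := by omega
      rw [hm]
      unfold pvE
      exact pvFilter_eq_pos l (l.length - 1)
    rw [hfilter]
    set ps := pvPos 0 (pvE l) with hps
    set breaks : List Int := [-1] ++ ps ++ [(l.length : Int) - 1] with hbr
    have hbl : breaks.length = ps.length + 2 := by rw [hbr]; simp
    have hlz : ((breaks.zip breaks.tail).length : Int) = (breaks.length : Int) - 1 := by
      rw [List.length_zip, List.length_tail]
      omega
    -- B's index loop = fold over zip of breaks with its tail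
    have hzip : (PySem.List.pyRange 0 ((breaks.length : Int) - 1) 1).foldl
        (fun best j => max best (PySem.List.pyGetD breaks (j + 1) 0 - PySem.List.pyGetD breaks j 0)) 0
        = (breaks.zip breaks.tail).foldl (fun b pr => max b (pr.2 - pr.1)) 0 := by
      rw [← hlz, ← PySem.List.foldl_pyRange_zero_pyGetD' (breaks.zip breaks.tail)
        ((0 : Int), (0 : Int)) (fun b pr => max b (pr.2 - pr.1)) 0]
      apply PySem.List.foldl_congr_mem
      intro acc j hj
      rw [PySem.List.mem_pyRange_one] at hj
      obtain ⟨hj0, hj1⟩ := hj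
      have e1 : PySem.List.pyGetD (breaks.zip breaks.tail) j ((0 : Int), (0 : Int))
          = (breaks.zip breaks.tail)[j.toNat]'(by omega) :=
        PySem.List.pyGetD_eq_getElem _ _ (by omega) (by omega)
      have e2 : PySem.List.pyGetD breaks j 0 = breaks[j.toNat]'(by omega) :=
        PySem.List.pyGetD_eq_getElem _ _ (by omega) (by omega)
      have e3 : PySem.List.pyGetD breaks (j + 1) 0 = breaks[(j + 1).toNat]'(by omega) :=
        PySem.List.pyGetD_eq_getElem _ _ (by omega) (by omega)
      have hj1' : (j + 1).toNat = j.toNat + 1 := by omega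
      rw [e1, e2, e3]
      simp [List.getElem_zip, List.getElem_tail, hj1']
    rw [hzip]
    have hcons : breaks = (-1) :: (ps ++ [(l.length : Int) - 1]) := by rw [hbr]; simp
    rw [hcons, List.tail_cons, pvZipFold, pvGmP_append_singleton]
    -- A's side
    obtain ⟨hA, _⟩ := pvCore (pvE l)
    have hEl : (((pvE l).length : Nat) : Int) = (l.length : Int) - 1 := by
      unfold pvE
      rw [List.length_map, List.length_range]
      omega
    by_cases h1 : (l.length : Int) = 1
    · -- n = 1 : A returns 1 early; pvE l = [] so the break-gap value is also 1
      have he : pvE l = [] := by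
        have hl1 : l.length = 1 := by omega
        unfold pvE
        rw [hl1]
        rfl
      rw [if_pos h1, hps, he]
      simp [pvPos, pvGmP, h1]
    · rw [if_neg h1, pvBridgeA l hlen, hA, hEl, hps]

-- ===== VERDICT (by name: the statement is the Claim_ definition above) =====
theorem max_length_of_substring_spec : Claim_equal_max_length_of_substring := by
  intro s _
  unfold Spec_max_length_of_substring
  exact pvMain s
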